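-- pv_equiv track=rewrite | github.com/aidengindin/advent_of_code_2024 | day16/part1.py | parse
-- ===== SOURCE A (Python) =====
-- def parse(lines):
--     start = None
--     end = None
--     tiles = set()
--     lines = [line.strip() for line in lines]
--     for i in range(len(lines)):
--         line = lines[i]
--         for j in range(len(line)):
--             char = lines[i][j]
--             position = (j, i)
--             if char == "S":
--                 start = position
--                 tiles.add(position)
--             elif char == "E":
--                 end = position
--                 tiles.add(position)
--             elif char == ".":
--                 tiles.add(position)
--     return start, end, tiles
-- ===== SOURCE B (Python) =====
-- def parse(lines):
--     lines = [line.strip() for line in lines]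
--     cells = [(c, (j, i))
--              for i, line in enumerate(lines)
--              for j, c in enumerate(line)]
--     tiles = {pos for c, pos in cells if c in ('.', 'S', 'E')}
--     s_hits = [pos for c, pos in cells if c == 'S']
--     e_hits = [pos for c, pos in cells if c == 'E']
--     start = s_hits[-1] if s_hits else None
--     end = e_hits[-1] if e_hits else None
--     return start, end, tiles
-- ===== Notes on version B (the rewrite author's own statement) =====
-- stated objective: simpler
-- what changed: A's single nested index-loop that threads (start, end, tiles) state is replaced by building one flat cells list via enumerate and deriving each component separately: tiles as a set comprehension over cells, start/end as the last element of a filtered hits list.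
import Mathlib
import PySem

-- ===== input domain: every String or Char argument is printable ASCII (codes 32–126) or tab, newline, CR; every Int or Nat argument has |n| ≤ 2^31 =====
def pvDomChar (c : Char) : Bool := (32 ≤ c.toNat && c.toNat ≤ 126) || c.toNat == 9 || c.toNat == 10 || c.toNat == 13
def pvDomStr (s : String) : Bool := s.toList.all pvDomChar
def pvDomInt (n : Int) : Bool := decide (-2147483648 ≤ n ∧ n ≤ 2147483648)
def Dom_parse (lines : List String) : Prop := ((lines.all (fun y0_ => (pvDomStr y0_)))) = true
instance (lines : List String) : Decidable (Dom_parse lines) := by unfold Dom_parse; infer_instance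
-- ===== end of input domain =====

-- B replaces A's state-threading nested index loop by one flat cells list plus separate per-component passes (objective: simpler decomposition).

-- ===== PORT A =====
def parse (lines : List String) : (Option (Int × Int)) × (Option (Int × Int)) × (List (Int × Int)) :=
  let lines := lines.map (fun line => PySem.Str.strip line)
  (PySem.List.pyRange 0 (PySem.List.len lines) 1).foldl
    (fun (st : Option (Int × Int) × Option (Int × Int) × PySem.Set (Int × Int)) i =>
      let line := PySem.List.pyGetD lines i ""
      (PySem.List.pyRange 0 (PySem.List.len line.toList) 1).foldl
        (fun st j =>
          let char := PySem.List.pyGetD line.toList j ' '  -- i, j produced by range(len(..)): always in range, so the defaults are never used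
          let position : Int × Int := (j, i)
          if char == 'S' then (some position, st.2.1, PySem.Set.add st.2.2 position)
          else if char == 'E' then (st.1, some position, PySem.Set.add st.2.2 position)
          else if char == '.' then (st.1, st.2.1, PySem.Set.add st.2.2 position)
          else st) st)
    (none, none, PySem.Set.empty)

-- ===== PORT B =====
def parse_alt (lines : List String) : (Option (Int × Int)) × (Option (Int × Int)) × (List (Int × Int)) :=
  let lines := lines.map (fun line => PySem.Str.strip line)
  let cells := (PySem.List.enumerate lines 0).flatMap
    (fun p => (PySem.List.enumerate p.2.toList 0).map (fun q => (q.2, ((q.1, p.1) : Int × Int))))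
  let tiles := PySem.Set.ofList
    ((cells.filter (fun r => r.1 == '.' || r.1 == 'S' || r.1 == 'E')).map (·.2))
  let sHits := (cells.filter (fun r => r.1 == 'S')).map (·.2)
  let eHits := (cells.filter (fun r => r.1 == 'E')).map (·.2)
  -- 'xs[-1] if xs else None' = PySem.List.pyGet? xs (-1)
  (PySem.List.pyGet? sHits (-1), PySem.List.pyGet? eHits (-1), tiles)

-- ===== PRECONDITION & SPEC =====
def Spec_parse (lines : List String) (out : (Option (Int × Int)) × (Option (Int × Int)) × (List (Int × Int))) : Prop := out = parse_alt lines
instance (lines : List String) (out : (Option (Int × Int)) × (Option (Int × Int)) × (List (Int × Int))) : Decidable (Spec_parse lines out) := by unfold Spec_parse; infer_instance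

-- ===== CLAIM (what is proved, stated in full; the proofs are below) =====
def Claim_equal_parse : Prop := ∀ (lines : List String), Dom_parse lines → Spec_parse lines (parse lines)

-- ===== LEMMAS AND PROOFS =====

-- A's loop body, on a (char, position) cell
def pstep (st : Option (Int × Int) × Option (Int × Int) × PySem.Set (Int × Int))
    (p : Char × (Int × Int)) : Option (Int × Int) × Option (Int × Int) × PySem.Set (Int × Int) :=
  if p.1 == 'S' then (some p.2, st.2.1, PySem.Set.add st.2.2 p.2)
  else if p.1 == 'E' then (st.1, some p.2, PySem.Set.add st.2.2 p.2)
  else if p.1 == '.' then (st.1, st.2.1, PySem.Set.add st.2.2 p.2)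
  else st

-- B's flat cells list (on already-stripped lines)
def pcells (ls : List String) : List (Char × (Int × Int)) :=
  (PySem.List.enumerate ls 0).flatMap
    (fun p => (PySem.List.enumerate p.2.toList 0).map (fun q => (q.2, ((q.1, p.1) : Int × Int))))

lemma getLast?_cons_or {α : Type} (a : α) (l : List α) (s0 : Option α) :
    ((a :: l).getLast?).or s0 = (l.getLast?).or (some a) := by
  cases h : l.getLast? <;> simp [List.getLast?_cons, h]

-- Folding A's body over any flat cells list = B's three independent passes
lemma foldl_cells (cells : List (Char × (Int × Int))) (s0 e0 : Option (Int × Int))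
    (t0 : PySem.Set (Int × Int)) :
    cells.foldl pstep (s0, e0, t0)
      = ( (((cells.filter (fun r => r.1 == 'S')).map (·.2)).getLast?).or s0,
          (((cells.filter (fun r => r.1 == 'E')).map (·.2)).getLast?).or e0,
          List.foldl PySem.Set.add t0
            ((cells.filter (fun r => r.1 == '.' || r.1 == 'S' || r.1 == 'E')).map (·.2)) ) := by
  induction cells generalizing s0 e0 t0 with
  | nil => simp
  | cons p rest ih =>
    by_cases hS : p.1 = 'S'
    · simp [pstep, hS, ih, getLast?_cons_or]
    · by_cases hE : p.1 = 'E'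
      · simp [pstep, hE, ih, getLast?_cons_or]
      · by_cases hD : p.1 = '.'
        · simp [pstep, hD, ih]
        · simp [pstep, hS, hE, hD, ih]

lemma row_to_enumerate (i : Int) (line : List Char)
    (st : Option (Int × Int) × Option (Int × Int) × PySem.Set (Int × Int)) :
    (PySem.List.pyRange 0 (PySem.List.len line)).foldl
        (fun st j => pstep st (PySem.List.pyGetD line j ' ', (j, i))) st
      = (PySem.List.enumerate line 0).foldl (fun st q => pstep st (q.2, (q.1, i))) st := by
  rw [PySem.List.enumerate_eq_map_pyRange line ' ', List.foldl_map]

lemma outer_to_enumerate (ls : List String)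
    (init : Option (Int × Int) × Option (Int × Int) × PySem.Set (Int × Int)) :
    (PySem.List.pyRange 0 (PySem.List.len ls)).foldl
        (fun st i => (PySem.List.enumerate (PySem.List.pyGetD ls i "").toList 0).foldl
          (fun st q => pstep st (q.2, (q.1, i))) st) init
      = (PySem.List.enumerate ls 0).foldl
          (fun st p => (PySem.List.enumerate p.2.toList 0).foldl
            (fun st q => pstep st (q.2, (q.1, p.1))) st) init := by
  rw [PySem.List.enumerate_eq_map_pyRange ls "", List.foldl_map]

-- A's nested index loop = one fold of A's body over the flat cells list
lemma Afold_eq (ls : List String) :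
    (PySem.List.pyRange 0 (PySem.List.len ls)).foldl
      (fun st i =>
        let line := PySem.List.pyGetD ls i ""
        (PySem.List.pyRange 0 (PySem.List.len line.toList)).foldl
          (fun st j => pstep st (PySem.List.pyGetD line.toList j ' ', (j, i))) st)
      (none, none, PySem.Set.empty)
    = (pcells ls).foldl pstep (none, none, PySem.Set.empty) := by
  unfold pcells
  rw [List.foldl_flatMap]
  simp only [List.foldl_map]
  rw [← outer_to_enumerate]
  have hb : (fun (st : Option (Int × Int) × Option (Int × Int) × PySem.Set (Int × Int)) (i : Int) =>
      let line := PySem.List.pyGetD ls i ""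
      (PySem.List.pyRange 0 (PySem.List.len line.toList)).foldl
        (fun st j => pstep st (PySem.List.pyGetD line.toList j ' ', (j, i))) st)
      = (fun st i => (PySem.List.enumerate (PySem.List.pyGetD ls i "").toList 0).foldl
          (fun st q => pstep st (q.2, (q.1, i))) st) :=
    funext fun st => funext fun i => row_to_enumerate i _ st
  rw [hb]

lemma parse_eq_cells (lines : List String) :
    parse lines = (pcells (lines.map (fun line => PySem.Str.strip line))).foldl pstep
      (none, none, PySem.Set.empty) := by
  unfold parse
  exact Afold_eq _

-- ===== VERDICT (by name: the statement is the Claim_ definition above) =====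
theorem parse_spec : Claim_equal_parse := by
  intro lines _
  show parse lines = parse_alt lines
  rw [parse_eq_cells]
  show (pcells (lines.map (fun line => PySem.Str.strip line))).foldl pstep
    (none, none, (PySem.Set.empty : PySem.Set (Int × Int))) = parse_alt lines
  rw [foldl_cells]
  unfold parse_alt pcells
  simp [PySem.List.pyGet?_neg_one, ← PySem.Set.ofList_eq_foldl, PySem.Set.empty]
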